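-- pv_equiv track=rewrite | github.com/hemantio/not-enough-rgb | chromaglow.py | _visible_ranges
-- ===== SOURCE A (Python) =====
-- def _visible_ranges(start, end, fixed_min, fixed_max,
--                     is_horizontal, occluders):
--     """Compute which parts of an edge are NOT hidden behind front windows.
--
--     Instead of checking each segment individually (slow), we compute
--     visible intervals once per edge (fast).
--
--     Returns: list of (range_start, range_end) visible intervals.
--     """
--     blocked = []
--     for (ox, oy, ow, oh) in occluders:
--         if is_horizontal:
--             # Does this occluder cover the Y position of this border?
--             if oy < fixed_max and oy + oh > fixed_min:
--                 bs = max(start, ox)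
--                 be = min(end, ox + ow)
--                 if bs < be:
--                     blocked.append((bs, be))
--         else:
--             # Does this occluder cover the X position of this border?
--             if ox < fixed_max and ox + ow > fixed_min:
--                 bs = max(start, oy)
--                 be = min(end, oy + oh)
--                 if bs < be:
--                     blocked.append((bs, be))
--
--     if not blocked:
--         return [(start, end)]
--
--     # Sort and merge blocked intervals
--     blocked.sort()
--     merged = [list(blocked[0])]
--     for bs, be in blocked[1:]:
--         if bs <= merged[-1][1]:
--             merged[-1][1] = max(merged[-1][1], be)
--         else:
--             merged.append([bs, be])
--
--     # Visible = total range minus blocked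
--     visible = []
--     pos = start
--     for bs, be in merged:
--         if pos < bs:
--             visible.append((pos, bs))
--         pos = max(pos, be)
--     if pos < end:
--         visible.append((pos, end))
--
--     return visible
-- ===== SOURCE B (Python) =====
-- def _visible_ranges(start, end, fixed_min, fixed_max,
--                     is_horizontal, occluders):
--     """Compute visible parts of the edge by subtracting each qualifying
--     occluder's clamped span directly from the running list of visible
--     intervals (interval subtraction; no sort/merge/gap-scan passes)."""
--     visible = [(start, end)]
--     for ox, oy, ow, oh in occluders:
--         if is_horizontal:
--             fa, fb = oy, oy + oh
--             ma, mb = ox, ox + ow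
--         else:
--             fa, fb = ox, ox + ow
--             ma, mb = oy, oy + oh
--         if fa < fixed_max and fb > fixed_min:
--             bs = max(start, ma)
--             be = min(end, mb)
--             if bs < be:
--                 pieces = []
--                 for lo, hi in visible:
--                     if lo < min(hi, bs):
--                         pieces.append((lo, min(hi, bs)))
--                     if max(lo, be) < hi:
--                         pieces.append((max(lo, be), hi))
--                 visible = pieces
--     return visible
-- ===== Notes on version B (the rewrite author's own statement) =====
-- stated objective: alternative
-- what changed: Replaces A's three staged passes (collect blocked spans, sort+merge them, then scan for gaps) with a single pass that subtracts each qualifying clamped occluder span directly from a running list of visible intervals; no sorting or merging.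
import Mathlib
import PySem

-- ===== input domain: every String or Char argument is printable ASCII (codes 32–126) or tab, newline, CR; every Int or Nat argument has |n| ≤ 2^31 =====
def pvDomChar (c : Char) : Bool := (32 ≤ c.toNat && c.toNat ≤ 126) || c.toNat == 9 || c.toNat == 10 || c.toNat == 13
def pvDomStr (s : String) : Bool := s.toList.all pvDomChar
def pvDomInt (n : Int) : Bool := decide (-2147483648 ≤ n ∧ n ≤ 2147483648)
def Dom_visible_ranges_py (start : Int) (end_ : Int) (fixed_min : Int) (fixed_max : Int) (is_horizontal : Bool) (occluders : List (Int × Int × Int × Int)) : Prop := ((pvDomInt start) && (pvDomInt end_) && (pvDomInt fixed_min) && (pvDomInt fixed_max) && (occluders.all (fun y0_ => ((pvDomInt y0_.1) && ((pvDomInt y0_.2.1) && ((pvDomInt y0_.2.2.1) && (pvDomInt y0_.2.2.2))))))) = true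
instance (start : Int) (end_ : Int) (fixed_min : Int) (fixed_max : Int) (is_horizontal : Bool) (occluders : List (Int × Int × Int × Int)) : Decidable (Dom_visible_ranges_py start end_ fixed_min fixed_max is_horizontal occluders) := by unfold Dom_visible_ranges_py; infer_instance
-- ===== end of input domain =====

-- ===== PORT A =====
-- A: collect clamped blocked spans, sort them (tuple order), merge overlapping/touching
-- ones left to right, then scan the merged list for the uncovered gaps.
def visible_ranges_py (start : Int) (end_ : Int) (fixed_min : Int) (fixed_max : Int) (is_horizontal : Bool) (occluders : List (Int × Int × Int × Int)) : List (Int × Int) :=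
  let blocked := occluders.foldl (fun acc o =>
    let (ox, oy, ow, oh) := o
    if is_horizontal then
      if oy < fixed_max ∧ oy + oh > fixed_min then
        let bs := max start ox
        let be := min end_ (ox + ow)
        if bs < be then acc ++ [(bs, be)] else acc
      else acc
    else
      if ox < fixed_max ∧ ox + ow > fixed_min then
        let bs := max start oy
        let be := min end_ (oy + oh)
        if bs < be then acc ++ [(bs, be)] else acc
      else acc) []
  if blocked = [] then [(start, end_)]
  else
    match PySem.List.sorted2 blocked (fun p => p.1) (fun p => p.2) with
    | [] => [(start, end_)]   -- unreachable: sorted2 of a nonempty list is nonempty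
    | h :: t =>
      -- merged kept as (finished intervals, current last interval); Python mutates merged[-1]
      let m := t.foldl (fun (st : List (Int × Int) × (Int × Int)) p =>
        if p.1 ≤ st.2.2 then (st.1, (st.2.1, max st.2.2 p.2))
        else (st.1 ++ [st.2], p)) ([], h)
      let merged := m.1 ++ [m.2]
      let v := merged.foldl (fun (st : List (Int × Int) × Int) p =>
        ((if st.2 < p.1 then st.1 ++ [(st.2, p.1)] else st.1), max st.2 p.2)) ([], start)
      if v.2 < end_ then v.1 ++ [(v.2, end_)] else v.1

-- ===== PORT B =====
-- B: one pass over the occluders, subtracting each qualifying clamped span from the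
-- running list of visible intervals.
def visible_ranges_py_alt (start : Int) (end_ : Int) (fixed_min : Int) (fixed_max : Int) (is_horizontal : Bool) (occluders : List (Int × Int × Int × Int)) : List (Int × Int) :=
  occluders.foldl (fun visible o =>
    let (ox, oy, ow, oh) := o
    let (fa, fb, ma, mb) :=
      if is_horizontal then (oy, oy + oh, ox, ox + ow)
      else (ox, ox + ow, oy, oy + oh)
    if fa < fixed_max ∧ fb > fixed_min then
      let bs := max start ma
      let be := min end_ mb
      if bs < be then
        visible.flatMap (fun q =>
          (if q.1 < min q.2 bs then [(q.1, min q.2 bs)] else []) ++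
          (if max q.1 be < q.2 then [(max q.1 be, q.2)] else []))
      else visible
    else visible) [(start, end_)]

-- ===== PRECONDITION & SPEC =====
def Spec_visible_ranges_py (start : Int) (end_ : Int) (fixed_min : Int) (fixed_max : Int) (is_horizontal : Bool) (occluders : List (Int × Int × Int × Int)) (out : List (Int × Int)) : Prop := out = visible_ranges_py_alt start end_ fixed_min fixed_max is_horizontal occluders
instance (start : Int) (end_ : Int) (fixed_min : Int) (fixed_max : Int) (is_horizontal : Bool) (occluders : List (Int × Int × Int × Int)) (out : List (Int × Int)) : Decidable (Spec_visible_ranges_py start end_ fixed_min fixed_max is_horizontal occluders out) := by unfold Spec_visible_ranges_py; infer_instance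

-- ===== CLAIM (what is proved, stated in full; the proofs are below) =====
def Claim_equal_visible_ranges_py : Prop := ∀ (start : Int) (end_ : Int) (fixed_min : Int) (fixed_max : Int) (is_horizontal : Bool) (occluders : List (Int × Int × Int × Int)), Dom_visible_ranges_py start end_ fixed_min fixed_max is_horizontal occluders → Spec_visible_ranges_py start end_ fixed_min fixed_max is_horizontal occluders (visible_ranges_py start end_ fixed_min fixed_max is_horizontal occluders)

-- ===== LEMMAS AND PROOFS =====

-- The clamped blocked span both programs compute for one occluder (none = rejected).
def clampOf (start : Int) (end_ : Int) (fixed_min : Int) (fixed_max : Int) (is_horizontal : Bool) (o : Int × Int × Int × Int) : Option (Int × Int) :=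
  let (ox, oy, ow, oh) := o
  if is_horizontal then
    if oy < fixed_max ∧ oy + oh > fixed_min then
      if max start ox < min end_ (ox + ow) then some (max start ox, min end_ (ox + ow)) else none
    else none
  else
    if ox < fixed_max ∧ ox + ow > fixed_min then
      if max start oy < min end_ (oy + oh) then some (max start oy, min end_ (oy + oh)) else none
    else none

-- B's one subtraction step.
def subI (bs be : Int) (V : List (Int × Int)) : List (Int × Int) :=
  V.flatMap (fun q =>
    (if q.1 < min q.2 bs then [(q.1, min q.2 bs)] else []) ++
    (if max q.1 be < q.2 then [(max q.1 be, q.2)] else []))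

-- A's merge loop in run form.
def mergeRun : Int × Int → List (Int × Int) → List (Int × Int)
  | cur, [] => [cur]
  | cur, p :: t => if p.1 ≤ cur.2 then mergeRun (cur.1, max cur.2 p.2) t else cur :: mergeRun p t

-- A's gap scan in recursive form.
def sweep (end_ : Int) (pos : Int) : List (Int × Int) → List (Int × Int)
  | [] => if pos < end_ then [(pos, end_)] else []
  | p :: t => (if pos < p.1 then [(pos, p.1)] else []) ++ sweep end_ (max pos p.2) t

-- Semantics: which points a list of half-open intervals covers.
def covers (V : List (Int × Int)) (x : Int) : Prop := ∃ p ∈ V, p.1 ≤ x ∧ x < p.2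

-- Canonical form: nonempty intervals, strictly separated, all starting at ≥ lb.
def chainFrom (lb : Int) : List (Int × Int) → Prop
  | [] => True
  | p :: t => lb ≤ p.1 ∧ p.1 < p.2 ∧ chainFrom (p.2 + 1) t

-- Python's tuple ≤ on pairs.
def lexle (p q : Int × Int) : Prop := p.1 < q.1 ∨ (p.1 = q.1 ∧ p.2 ≤ q.2)

theorem covers_nil (x : Int) : ¬ covers [] x := by simp [covers]

theorem covers_cons (p : Int × Int) (V : List (Int × Int)) (x : Int) :
    covers (p :: V) x ↔ (p.1 ≤ x ∧ x < p.2) ∨ covers V x := by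
  simp [covers]

theorem covers_append (V W : List (Int × Int)) (x : Int) :
    covers (V ++ W) x ↔ covers V x ∨ covers W x := by
  simp [covers, or_and_right, exists_or]

theorem covers_perm {V W : List (Int × Int)} (h : V.Perm W) (x : Int) :
    covers V x ↔ covers W x := by
  simp only [covers]
  constructor <;> rintro ⟨p, hp, h1, h2⟩ <;> exact ⟨p, by
    first | exact h.mem_iff.mp hp | exact h.mem_iff.mpr hp, h1, h2⟩

theorem chainFrom_mono {lb lb' : Int} (h : lb' ≤ lb) :
    ∀ {V : List (Int × Int)}, chainFrom lb V → chainFrom lb' V := by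
  intro V hV
  cases V with
  | nil => trivial
  | cons p t => exact ⟨by have := hV.1; omega, hV.2.1, hV.2.2⟩

theorem covers_ge {lb : Int} : ∀ {V : List (Int × Int)}, chainFrom lb V → ∀ {x : Int}, covers V x → lb ≤ x := by
  intro V
  induction V generalizing lb with
  | nil => intro _ x hx; exact absurd hx (covers_nil x)
  | cons p t ih =>
    intro hc x hx
    rcases (covers_cons p t x).mp hx with h | h
    · have := hc.1; omega
    · have h1 := hc.1; have h2 := hc.2.1; have := ih hc.2.2 h; omega

-- subtraction step: canonical in, canonical out, exact set semantics
theorem subI_spec (bs be : Int) (hbe : bs < be) :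
    ∀ (V : List (Int × Int)) (lb : Int), chainFrom lb V →
      chainFrom lb (subI bs be V) ∧
      (∀ x, covers (subI bs be V) x ↔ covers V x ∧ ¬ (bs ≤ x ∧ x < be)) := by
  intro V
  induction V with
  | nil => exact fun lb _ => ⟨trivial, fun x => by simp [subI, covers]⟩
  | cons q t ih =>
    intro lb hc
    obtain ⟨h1, h2, h3⟩ := hc
    obtain ⟨ihc, ihcov⟩ := ih (q.2 + 1) h3
    have hsub : subI bs be (q :: t) =
        ((if q.1 < min q.2 bs then [(q.1, min q.2 bs)] else []) ++
         (if max q.1 be < q.2 then [(max q.1 be, q.2)] else [])) ++ subI bs be t := by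
      simp [subI]
    constructor
    · rw [hsub]
      by_cases c1 : q.1 < min q.2 bs <;> by_cases c2 : max q.1 be < q.2 <;>
        simp only [c1, c2, if_true, if_false, List.cons_append, List.nil_append,
          List.append_nil] <;>
        (try simp only [chainFrom])
      · exact ⟨h1, c1, by omega, by omega, ihc⟩
      · exact ⟨h1, c1, chainFrom_mono (by omega) ihc⟩
      · exact ⟨by omega, c2, ihc⟩
      · exact chainFrom_mono (by omega) ihc
    · intro x
      rw [hsub, covers_append, ihcov, covers_cons]
      by_cases hct : covers t x <;>
        by_cases c1 : q.1 < min q.2 bs <;> by_cases c2 : max q.1 be < q.2 <;>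
        simp [c1, c2, covers_cons, covers_nil, hct] <;> omega

-- folding subtraction over a list of nonempty spans
theorem foldSub_spec (L : List (Int × Int)) (hL : ∀ p ∈ L, p.1 < p.2) :
    ∀ (V : List (Int × Int)) (lb : Int), chainFrom lb V →
      chainFrom lb (L.foldl (fun V p => subI p.1 p.2 V) V) ∧
      (∀ x, covers (L.foldl (fun V p => subI p.1 p.2 V) V) x ↔ covers V x ∧ ¬ covers L x) := by
  induction L with
  | nil => exact fun V lb hV => ⟨hV, fun x => by simp [covers_nil]⟩
  | cons p L ih =>
    intro V lb hV
    obtain ⟨hs, hscov⟩ := subI_spec p.1 p.2 (hL p (by simp)) V lb hV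
    obtain ⟨ihc, ihcov⟩ := ih (fun q hq => hL q (by simp [hq])) (subI p.1 p.2 V) lb hs
    refine ⟨ihc, fun x => ?_⟩
    rw [List.foldl_cons, ihcov, hscov, covers_cons]
    tauto

-- merging a fst-sorted list of nonempty spans: canonical result with the same coverage
theorem mergeRun_spec (end_ : Int) :
    ∀ (st : List (Int × Int)) (cur : Int × Int), cur.1 < cur.2 → cur.2 ≤ end_ →
      (∀ p ∈ st, cur.1 ≤ p.1 ∧ p.1 < p.2 ∧ p.2 ≤ end_) →
      st.Pairwise (fun p q => p.1 ≤ q.1) →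
      chainFrom cur.1 (mergeRun cur st) ∧
      (∀ p ∈ mergeRun cur st, p.2 ≤ end_) ∧
      (∀ x, covers (mergeRun cur st) x ↔ (cur.1 ≤ x ∧ x < cur.2) ∨ covers st x) := by
  intro st
  induction st with
  | nil =>
    intro cur h1 h2 _ _
    refine ⟨⟨le_refl _, h1, trivial⟩, ?_, fun x => by simp [mergeRun, covers_cons, covers_nil]⟩
    intro p hp
    simp only [mergeRun, List.mem_singleton] at hp
    subst hp; exact h2
  | cons p t ih =>
    intro cur h1 h2 hst hpw
    have hp0 := hst p (by simp)
    have hpw' := (List.pairwise_cons.mp hpw).2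
    have hph := (List.pairwise_cons.mp hpw).1
    by_cases h : p.1 ≤ cur.2
    · have hm := ih (cur.1, max cur.2 p.2) (by simp; omega) (by simp; omega)
        (fun q hq => by
          have := hst q (by simp [hq]); simpa using this)
        hpw'
      obtain ⟨hc, hb, hcov⟩ := hm
      rw [show mergeRun cur (p :: t) = mergeRun (cur.1, max cur.2 p.2) t from by
        simp [mergeRun, h]]
      refine ⟨by simpa using hc, hb, fun x => ?_⟩
      rw [hcov, covers_cons]
      have hh := hp0.1
      have hlt := hp0.2.1
      by_cases hct : covers t x <;> simp [hct] <;> omega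
    · have hm := ih p hp0.2.1 hp0.2.2
        (fun q hq => ⟨hph q hq, (hst q (by simp [hq])).2⟩) hpw'
      obtain ⟨hc, hb, hcov⟩ := hm
      rw [show mergeRun cur (p :: t) = cur :: mergeRun p t from by simp [mergeRun, h]]
      refine ⟨⟨le_refl _, h1, chainFrom_mono (by omega) hc⟩, ?_, fun x => ?_⟩
      · intro q hq
        rcases List.mem_cons.mp hq with hq | hq
        · subst hq; exact h2
        · exact hb q hq
      · rw [covers_cons, hcov, covers_cons]

-- sweeping a canonical merged list produces the canonical complement
theorem sweep_spec (end_ : Int) :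
    ∀ (M : List (Int × Int)) (pos : Int), chainFrom pos M → (∀ p ∈ M, p.2 ≤ end_) →
      chainFrom pos (sweep end_ pos M) ∧
      (∀ x, covers (sweep end_ pos M) x ↔ (pos ≤ x ∧ x < end_ ∧ ¬ covers M x)) := by
  intro M
  induction M with
  | nil =>
    intro pos _ _
    constructor
    · by_cases c : pos < end_ <;> simp [sweep, c, chainFrom]
    · intro x
      by_cases c : pos < end_ <;> simp [sweep, c, covers_cons, covers_nil] <;> omega
  | cons p t ih =>
    intro pos hc hub
    obtain ⟨h1, h2, h3⟩ := hc
    have hm : max pos p.2 = p.2 := by omega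
    have hsw : sweep end_ pos (p :: t) =
        (if pos < p.1 then [(pos, p.1)] else []) ++ sweep end_ p.2 t := by
      simp [sweep, hm]
    obtain ⟨ihc, ihcov⟩ := ih p.2 (chainFrom_mono (by omega) h3) (fun q hq => hub q (by simp [hq]))
    have hge : ∀ {x : Int}, covers t x → p.2 + 1 ≤ x := fun hx => covers_ge h3 hx
    have hp2 : p.2 ≤ end_ := hub p (by simp)
    constructor
    · rw [hsw]
      by_cases g : pos < p.1
      · rw [if_pos g]
        exact ⟨le_refl _, g, chainFrom_mono (by omega) ihc⟩
      · rw [if_neg g]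
        exact chainFrom_mono (by omega) ihc
    · intro x
      rw [hsw, covers_append, ihcov, covers_cons]
      by_cases hct : covers t x <;> by_cases g : pos < p.1 <;>
        simp [g, covers_cons, covers_nil, hct] <;>
        (try have := hge hct) <;> omega

-- canonical interval lists with the same coverage are equal
theorem canonical_unique :
    ∀ (V : List (Int × Int)) {W : List (Int × Int)} {lb lb' : Int},
      chainFrom lb V → chainFrom lb' W → (∀ x, covers V x ↔ covers W x) → V = W := by
  intro V
  induction V with
  | nil =>
    intro W lb lb' _ hW h
    cases W with
    | nil => rfl
    | cons q W' =>
      exact absurd ((h q.1).mpr ((covers_cons q W' q.1).mpr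
        (Or.inl ⟨le_refl _, hW.2.1⟩))) (covers_nil q.1)
  | cons p V' ih =>
    intro W lb lb' hV hW h
    cases W with
    | nil =>
      exact absurd ((h p.1).mp ((covers_cons p V' p.1).mpr
        (Or.inl ⟨le_refl _, hV.2.1⟩))) (covers_nil p.1)
    | cons q W' =>
      obtain ⟨hV1, hV2, hV3⟩ := hV
      obtain ⟨hW1, hW2, hW3⟩ := hW
      have hgeV : ∀ {x : Int}, covers V' x → p.2 + 1 ≤ x := fun hx => covers_ge hV3 hx
      have hgeW : ∀ {x : Int}, covers W' x → q.2 + 1 ≤ x := fun hx => covers_ge hW3 hx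
      have h11 : p.1 = q.1 := by
        have hA := (h p.1).mp ((covers_cons p V' p.1).mpr (Or.inl ⟨le_refl _, hV2⟩))
        have hB := (h q.1).mpr ((covers_cons q W' q.1).mpr (Or.inl ⟨le_refl _, hW2⟩))
        rw [covers_cons] at hA hB
        rcases hA with hA | hA
        · rcases hB with hB | hB
          · omega
          · have := hgeV hB; omega
        · rcases hB with hB | hB
          · have := hgeW hA; omega
          · have := hgeV hB; have := hgeW hA; omega
      have h22 : p.2 = q.2 := by
        have hn1 : ¬ p.2 < q.2 := by
          intro hlt
          have := (h p.2).mpr ((covers_cons q W' p.2).mpr (Or.inl ⟨by omega, hlt⟩))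
          rw [covers_cons] at this
          rcases this with hx | hx
          · omega
          · have := hgeV hx; omega
        have hn2 : ¬ q.2 < p.2 := by
          intro hlt
          have := (h q.2).mp ((covers_cons p V' q.2).mpr (Or.inl ⟨by omega, hlt⟩))
          rw [covers_cons] at this
          rcases this with hx | hx
          · omega
          · have := hgeW hx; omega
        omega
      have hpq : p = q := Prod.ext h11 h22
      have htails : ∀ x, covers V' x ↔ covers W' x := by
        intro x
        constructor
        · intro hx
          have hxge := hgeV hx
          have := (h x).mp ((covers_cons p V' x).mpr (Or.inr hx))
          rw [covers_cons] at this
          rcases this with hy | hy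
          · omega
          · exact hy
        · intro hx
          have hxge := hgeW hx
          have := (h x).mpr ((covers_cons q W' x).mpr (Or.inr hx))
          rw [covers_cons] at this
          rcases this with hy | hy
          · omega
          · exact hy
      rw [hpq, ih hV3 hW3 htails]

-- insertion sort with Python's tuple order is lexle-pairwise
theorem sorted2_pairwise (L : List (Int × Int)) :
    (PySem.List.sorted2 L (fun p => p.1) (fun p => p.2)).Pairwise lexle := by
  have ltrans : ∀ {a b c : Int × Int}, lexle a b → lexle b c → lexle a c := by
    intro a b c hab hbc
    unfold lexle at *
    omega
  have hbt : ∀ {a b : Int × Int},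
      (decide (a.1 < b.1) || (!decide (b.1 < a.1) && decide (a.2 < b.2))) = true → lexle a b := by
    intro a b h
    simp at h
    unfold lexle
    omega
  have hbf : ∀ {a b : Int × Int},
      (decide (a.1 < b.1) || (!decide (b.1 < a.1) && decide (a.2 < b.2))) = false → lexle b a := by
    intro a b h
    simp at h
    unfold lexle
    omega
  have hins : ∀ (x : Int × Int) (ys : List (Int × Int)), ys.Pairwise lexle →
      (PySem.List.insertBy (fun a b =>
        decide (a.1 < b.1) || (!decide (b.1 < a.1) && decide (a.2 < b.2))) x ys).Pairwise lexle := by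
    intro x ys
    induction ys with
    | nil => intro _; simp [PySem.List.insertBy]
    | cons y ys ih =>
      intro hp
      obtain ⟨hy, hp'⟩ := List.pairwise_cons.mp hp
      by_cases hb : (decide (x.1 < y.1) || (!decide (y.1 < x.1) && decide (x.2 < y.2))) = true
      · rw [PySem.List.insertBy, if_pos hb]
        refine List.pairwise_cons.mpr ⟨?_, hp⟩
        intro z hz
        rcases List.mem_cons.mp hz with hz | hz
        · subst hz; exact hbt hb
        · exact ltrans (hbt hb) (hy z hz)
      · rw [PySem.List.insertBy, if_neg hb]
        refine List.pairwise_cons.mpr ⟨?_, ih hp'⟩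
        intro w hw
        rcases (PySem.List.mem_insertBy _ x w ys).mp hw with hw | hw
        · subst hw; exact hbf (by simpa using hb)
        · exact hy w hw
  have haux : ∀ (l acc : List (Int × Int)), acc.Pairwise lexle →
      (l.foldl (fun acc x => PySem.List.insertBy (fun a b =>
        decide (a.1 < b.1) || (!decide (b.1 < a.1) && decide (a.2 < b.2))) x acc) acc).Pairwise lexle := by
    intro l
    induction l with
    | nil => exact fun acc h => h
    | cons x l ih => exact fun acc h => ih _ (hins x acc h)
  exact haux L [] List.Pairwise.nil

-- the per-occluder branch of port A is an append of clampOf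
theorem blockedA_eq (start end_ fixed_min fixed_max : Int) (is_horizontal : Bool)
    (occluders : List (Int × Int × Int × Int)) (acc : List (Int × Int)) :
    occluders.foldl (fun acc o =>
      let (ox, oy, ow, oh) := o
      if is_horizontal then
        if oy < fixed_max ∧ oy + oh > fixed_min then
          let bs := max start ox
          let be := min end_ (ox + ow)
          if bs < be then acc ++ [(bs, be)] else acc
        else acc
      else
        if ox < fixed_max ∧ ox + ow > fixed_min then
          let bs := max start oy
          let be := min end_ (oy + oh)
          if bs < be then acc ++ [(bs, be)] else acc
        else acc) acc
    = acc ++ occluders.filterMap (clampOf start end_ fixed_min fixed_max is_horizontal) := by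
  have hf : (fun (acc : List (Int × Int)) (o : Int × Int × Int × Int) =>
      let (ox, oy, ow, oh) := o
      if is_horizontal then
        if oy < fixed_max ∧ oy + oh > fixed_min then
          let bs := max start ox
          let be := min end_ (ox + ow)
          if bs < be then acc ++ [(bs, be)] else acc
        else acc
      else
        if ox < fixed_max ∧ ox + ow > fixed_min then
          let bs := max start oy
          let be := min end_ (oy + oh)
          if bs < be then acc ++ [(bs, be)] else acc
        else acc)
      = fun acc o => acc ++ (clampOf start end_ fixed_min fixed_max is_horizontal o).toList := by
    funext acc o
    rcases o with ⟨ox, oy, ow, oh⟩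
    cases is_horizontal <;> (simp only [clampOf]; split_ifs <;> simp)
  rw [hf]
  induction occluders generalizing acc with
  | nil => simp
  | cons o t ih =>
    rw [List.foldl_cons, List.filterMap_cons, ih]
    cases h : clampOf start end_ fixed_min fixed_max is_horizontal o <;> simp

-- port B is the subtraction fold over the clamped spans
theorem altB_eq (start end_ fixed_min fixed_max : Int) (is_horizontal : Bool)
    (occluders : List (Int × Int × Int × Int)) :
    visible_ranges_py_alt start end_ fixed_min fixed_max is_horizontal occluders
    = (occluders.filterMap (clampOf start end_ fixed_min fixed_max is_horizontal)).foldl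
        (fun V p => subI p.1 p.2 V) [(start, end_)] := by
  unfold visible_ranges_py_alt
  have hf : (fun (visible : List (Int × Int)) (o : Int × Int × Int × Int) =>
      let (ox, oy, ow, oh) := o
      let (fa, fb, ma, mb) :=
        if is_horizontal then (oy, oy + oh, ox, ox + ow)
        else (ox, ox + ow, oy, oy + oh)
      if fa < fixed_max ∧ fb > fixed_min then
        let bs := max start ma
        let be := min end_ mb
        if bs < be then
          visible.flatMap (fun q =>
            (if q.1 < min q.2 bs then [(q.1, min q.2 bs)] else []) ++
            (if max q.1 be < q.2 then [(max q.1 be, q.2)] else []))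
        else visible
      else visible)
      = fun visible o =>
          match clampOf start end_ fixed_min fixed_max is_horizontal o with
          | some p => subI p.1 p.2 visible
          | none => visible := by
    funext visible o
    rcases o with ⟨ox, oy, ow, oh⟩
    cases is_horizontal <;> (simp only [clampOf]; split_ifs <;> simp [subI])
  rw [hf]
  generalize [((start : Int), (end_ : Int))] = V
  induction occluders generalizing V with
  | nil => simp
  | cons o t ih =>
    rw [List.foldl_cons, List.filterMap_cons]
    cases h : clampOf start end_ fixed_min fixed_max is_horizontal o <;> simp [ih]

-- A's merge fold is mergeRun
theorem mergeFold_eq (t : List (Int × Int)) :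
    ∀ (done : List (Int × Int)) (cur : Int × Int),
      (t.foldl (fun (st : List (Int × Int) × (Int × Int)) p =>
        if p.1 ≤ st.2.2 then (st.1, (st.2.1, max st.2.2 p.2))
        else (st.1 ++ [st.2], p)) (done, cur)).1
      ++ [(t.foldl (fun (st : List (Int × Int) × (Int × Int)) p =>
        if p.1 ≤ st.2.2 then (st.1, (st.2.1, max st.2.2 p.2))
        else (st.1 ++ [st.2], p)) (done, cur)).2]
      = done ++ mergeRun cur t := by
  intro done cur
  induction t generalizing done cur with
  | nil => simp [mergeRun]
  | cons p t ih =>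
    simp only [List.foldl_cons, mergeRun]
    by_cases h : p.1 ≤ cur.2
    · simp only [h, if_true, ih]
    · simp only [h, if_false, ih]
      simp

-- A's gap-scan fold is sweep
theorem sweepFold_eq (end_ : Int) (M : List (Int × Int)) :
    ∀ (v : List (Int × Int)) (pos : Int),
      (if (M.foldl (fun (st : List (Int × Int) × Int) p =>
            ((if st.2 < p.1 then st.1 ++ [(st.2, p.1)] else st.1), max st.2 p.2)) (v, pos)).2 < end_
       then (M.foldl (fun (st : List (Int × Int) × Int) p =>
            ((if st.2 < p.1 then st.1 ++ [(st.2, p.1)] else st.1), max st.2 p.2)) (v, pos)).1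
            ++ [((M.foldl (fun (st : List (Int × Int) × Int) p =>
            ((if st.2 < p.1 then st.1 ++ [(st.2, p.1)] else st.1), max st.2 p.2)) (v, pos)).2, end_)]
       else (M.foldl (fun (st : List (Int × Int) × Int) p =>
            ((if st.2 < p.1 then st.1 ++ [(st.2, p.1)] else st.1), max st.2 p.2)) (v, pos)).1)
      = v ++ sweep end_ pos M := by
  intro v pos
  induction M generalizing v pos with
  | nil => by_cases h : pos < end_ <;> simp [sweep, h]
  | cons p t ih =>
    simp only [List.foldl_cons, sweep]
    by_cases h : pos < p.1
    · simp only [h, if_true]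
      rw [ih]
      simp
    · simp only [h, if_false, ih]
      simp

-- every clamped span is a nonempty subinterval of [start, end_)
theorem clampOf_mem (start end_ fixed_min fixed_max : Int) (is_horizontal : Bool)
    (occluders : List (Int × Int × Int × Int)) :
    ∀ p ∈ occluders.filterMap (clampOf start end_ fixed_min fixed_max is_horizontal),
      start ≤ p.1 ∧ p.1 < p.2 ∧ p.2 ≤ end_ := by
  intro p hp
  rw [List.mem_filterMap] at hp
  obtain ⟨o, -, ho⟩ := hp
  rcases o with ⟨ox, oy, ow, oh⟩
  cases is_horizontal <;>
  · simp only [clampOf] at ho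
    split_ifs at ho <;>
      (injection ho with ho; subst ho;
       exact ⟨le_max_left _ _, by assumption, min_le_left _ _⟩)

-- ===== VERDICT (by name: the statement is the Claim_ definition above) =====
theorem visible_ranges_py_spec : Claim_equal_visible_ranges_py := by
  intro start end_ fixed_min fixed_max is_horizontal occluders _
  unfold Spec_visible_ranges_py
  rw [altB_eq]
  unfold visible_ranges_py
  rw [blockedA_eq, List.nil_append]
  set L := occluders.filterMap (clampOf start end_ fixed_min fixed_max is_horizontal) with hLdef
  by_cases hL : L = []
  · simp [hL]
  · rw [if_neg hL]
    have hP := clampOf_mem start end_ fixed_min fixed_max is_horizontal occluders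
    rw [← hLdef] at hP
    cases hS : PySem.List.sorted2 L (fun p => p.1) (fun p => p.2) with
    | nil =>
      have hperm := PySem.List.sorted2_perm L (fun p => p.1) (fun p => p.2) false
      rw [hS] at hperm
      exact absurd hperm.symm.eq_nil hL
    | cons s0 st =>
      dsimp only
      rw [mergeFold_eq, sweepFold_eq, List.nil_append, List.nil_append]
      have hperm := PySem.List.sorted2_perm L (fun p => p.1) (fun p => p.2) false
      rw [hS] at hperm
      have hPm : ∀ p ∈ s0 :: st, start ≤ p.1 ∧ p.1 < p.2 ∧ p.2 ≤ end_ :=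
        fun p hp => hP p (hperm.subset hp)
      have hs0 := hPm s0 (by simp)
      have hse : start < end_ := by omega
      have hpw : (s0 :: st).Pairwise lexle := hS ▸ sorted2_pairwise L
      have hpwf : st.Pairwise (fun p q => p.1 ≤ q.1) :=
        ((List.pairwise_cons.mp hpw).2).imp (fun h => by unfold lexle at h; omega)
      have hhd : ∀ q ∈ st, s0.1 ≤ q.1 := fun q hq => by
        have := (List.pairwise_cons.mp hpw).1 q hq
        unfold lexle at this
        omega
      obtain ⟨hMc, hMb, hMcov⟩ := mergeRun_spec end_ st s0 hs0.2.1 hs0.2.2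
        (fun q hq => ⟨hhd q hq, (hPm q (by simp [hq])).2⟩) hpwf
      obtain ⟨hAc, hAcov⟩ := sweep_spec end_ (mergeRun s0 st) start
        (chainFrom_mono hs0.1 hMc) hMb
      obtain ⟨hBc, hBcov⟩ := foldSub_spec L (fun p hp => (hP p hp).2.1)
        [(start, end_)] start ⟨le_refl _, hse, trivial⟩
      refine canonical_unique _ hAc hBc (fun x => ?_)
      rw [hAcov, hBcov, hMcov]
      have hcovL : ((s0.1 ≤ x ∧ x < s0.2) ∨ covers st x) ↔ covers L x := by
        rw [← covers_cons]
        exact covers_perm hperm x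
      rw [← hcovL]
      by_cases hcs : covers st x <;>
        simp [hcs, covers_cons, covers_nil] <;> omega
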